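-- pv_equiv track=rewrite | github.com/ManavGarg241/ecommerce-growth-intelligence | src/analysis/phase4_forecasting.py | parse_named_queries
-- ===== SOURCE A (Python) =====
-- def parse_named_queries(sql_text: str) -> dict[str, str]:
--     queries: dict[str, str] = {}
--     current_name: str | None = None
--     current_lines: list[str] = []
--
--     for line in sql_text.splitlines():
--         stripped = line.strip()
--         if stripped.startswith("-- name:"):
--             if current_name and current_lines:
--                 queries[current_name] = "\n".join(current_lines).strip()
--             current_name = stripped.replace("-- name:", "").strip()
--             current_lines = []
--             continue
--         if current_name is not None:
--             current_lines.append(line)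
--
--     if current_name and current_lines:
--         queries[current_name] = "\n".join(current_lines).strip()
--
--     return queries
-- ===== SOURCE B (Python) =====
-- def _is_marker(line):
--     return line.strip().startswith("-- name:")
--
--
-- def _blocks(lines):
--     """Split a line list whose head is a marker into (name, raw body lines) blocks."""
--     out = []
--     while lines:
--         name = lines[0].strip().replace("-- name:", "").strip()
--         i = 1
--         while i < len(lines) and not _is_marker(lines[i]):
--             i += 1
--         out.append((name, lines[1:i]))
--         lines = lines[i:]
--     return out
--
--
-- def parse_named_queries(sql_text: str) -> dict[str, str]:
--     lines = sql_text.splitlines()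
--     j = 0
--     while j < len(lines) and not _is_marker(lines[j]):
--         j += 1
--     queries: dict[str, str] = {}
--     for name, body in _blocks(lines[j:]):
--         if name and body:
--             queries[name] = "\n".join(body).strip()
--     return queries
-- ===== Notes on version B (the rewrite author's own statement) =====
-- stated objective: alternative
-- what changed: Replaces A's single running accumulator (current_name/current_lines with mid-loop and post-loop flushes) by a two-phase decomposition: drop the preamble, split the remaining lines into (name, body-slice) blocks at the marker lines, then fold the blocks into the dict.
import Mathlib
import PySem

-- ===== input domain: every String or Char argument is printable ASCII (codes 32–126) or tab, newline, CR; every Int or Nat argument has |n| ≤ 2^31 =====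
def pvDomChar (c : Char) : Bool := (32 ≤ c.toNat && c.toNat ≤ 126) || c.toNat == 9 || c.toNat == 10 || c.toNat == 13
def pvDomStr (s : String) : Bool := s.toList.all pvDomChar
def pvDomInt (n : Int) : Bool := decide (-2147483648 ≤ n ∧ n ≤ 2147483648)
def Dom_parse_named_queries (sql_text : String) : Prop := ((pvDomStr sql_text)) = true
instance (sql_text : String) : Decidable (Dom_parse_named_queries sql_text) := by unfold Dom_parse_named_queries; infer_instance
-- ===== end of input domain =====

-- B replaces A's running accumulator with a drop-preamble / split-into-blocks / fold decomposition (alternative structure, same cost).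

-- ===== PORT A =====
-- state: (queries, current_name, current_lines)
def pvAStep (st : PySem.Dict String String × Option String × List String) (line : String) :
    PySem.Dict String String × Option String × List String :=
  let q := st.1
  let cn := st.2.1
  let cl := st.2.2
  let stripped := PySem.Str.strip line
  if PySem.Str.startswith stripped "-- name:" then
    let q' := match cn with
      | some n =>
          if n ≠ "" ∧ cl ≠ [] then q.insert n (PySem.Str.strip (PySem.Str.join "\n" cl)) else q
      | none => q
    (q', some (PySem.Str.strip (PySem.Str.replace stripped "-- name:" "")), [])
  else
    match cn with
    | some _ => (q, cn, cl ++ [line])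
    | none => (q, cn, cl)

def parse_named_queries (sql_text : String) : List (String × String) :=
  let fin := (PySem.Str.splitlines sql_text).foldl pvAStep (PySem.Dict.empty, none, [])
  (match fin.2.1 with
   | some n =>
       if n ≠ "" ∧ fin.2.2 ≠ [] then
         fin.1.insert n (PySem.Str.strip (PySem.Str.join "\n" fin.2.2))
       else fin.1
   | none => fin.1).items

-- ===== PORT B =====
def pvIsMarker (line : String) : Bool :=
  PySem.Str.startswith (PySem.Str.strip line) "-- name:"

-- split a line list whose head is a marker into (name, raw body lines) blocks
def pvBlocks : List String → List (String × List String)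
  | [] => []
  | l :: rest =>
    (PySem.Str.strip (PySem.Str.replace (PySem.Str.strip l) "-- name:" ""),
      rest.takeWhile (fun x => !pvIsMarker x)) ::
    pvBlocks (rest.dropWhile (fun x => !pvIsMarker x))
  termination_by lines => lines.length
  decreasing_by
    simpa using Nat.lt_succ_of_le (List.length_dropWhile_le _ _)

def pvFlush (q : PySem.Dict String String) (name : String) (body : List String) :
    PySem.Dict String String :=
  if name ≠ "" ∧ body ≠ [] then q.insert name (PySem.Str.strip (PySem.Str.join "\n" body)) else q

def parse_named_queries_alt (sql_text : String) : List (String × String) :=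
  let lines := (PySem.Str.splitlines sql_text).dropWhile (fun x => !pvIsMarker x)
  ((pvBlocks lines).foldl (fun q p => pvFlush q p.1 p.2) PySem.Dict.empty).items

-- ===== PRECONDITION & SPEC =====
def Spec_parse_named_queries (sql_text : String) (out : List (String × String)) : Prop := out = parse_named_queries_alt sql_text
instance (sql_text : String) (out : List (String × String)) : Decidable (Spec_parse_named_queries sql_text out) := by unfold Spec_parse_named_queries; infer_instance

-- ===== CLAIM (what is proved, stated in full; the proofs are below) =====
def Claim_equal_parse_named_queries : Prop := ∀ (sql_text : String), Dom_parse_named_queries sql_text → Spec_parse_named_queries sql_text (parse_named_queries sql_text)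

-- ===== LEMMAS AND PROOFS =====

-- A's final flush, as a function of the loop state
def pvADone (st : PySem.Dict String String × Option String × List String) :
    PySem.Dict String String :=
  match st.2.1 with
  | some n => pvFlush st.1 n st.2.2
  | none => st.1

theorem pvStepA_marker (l : String) (hm : pvIsMarker l = true)
    (q : PySem.Dict String String) (n : String) (cl : List String) :
    pvAStep (q, some n, cl) l =
      (pvFlush q n cl,
       some (PySem.Str.strip (PySem.Str.replace (PySem.Str.strip l) "-- name:" "")), []) := by
  simp [pvIsMarker] at hm
  simp [pvAStep, pvFlush, hm]

theorem pvStepA_nonmarker (l : String) (hm : pvIsMarker l = false)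
    (q : PySem.Dict String String) (n : String) (cl : List String) :
    pvAStep (q, some n, cl) l = (q, some n, cl ++ [l]) := by
  simp [pvIsMarker] at hm
  simp [pvAStep, hm]

theorem pvStepA_none_nonmarker (l : String) (hm : pvIsMarker l = false)
    (q : PySem.Dict String String) :
    pvAStep (q, none, []) l = (q, none, []) := by
  simp [pvIsMarker] at hm
  simp [pvAStep, hm]

theorem pvStepA_none_marker (l : String) (hm : pvIsMarker l = true)
    (q : PySem.Dict String String) :
    pvAStep (q, none, []) l =
      (q, some (PySem.Str.strip (PySem.Str.replace (PySem.Str.strip l) "-- name:" "")), []) := by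
  simp [pvIsMarker] at hm
  simp [pvAStep, hm]

-- main invariant: from an active (some n, cl) state, A's remaining loop + final flush
-- equals B's block fold seeded with the flush of the current block
theorem pvMain (lines : List String) :
    ∀ (q : PySem.Dict String String) (n : String) (cl : List String),
      pvADone (lines.foldl pvAStep (q, some n, cl)) =
        (pvBlocks (lines.dropWhile (fun x => !pvIsMarker x))).foldl
          (fun q p => pvFlush q p.1 p.2)
          (pvFlush q n (cl ++ lines.takeWhile (fun x => !pvIsMarker x))) := by
  induction lines with
  | nil => intro q n cl; simp [pvADone, pvBlocks]
  | cons l t ih =>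
    intro q n cl
    by_cases hm : pvIsMarker l = true
    · rw [List.foldl_cons, pvStepA_marker l hm, ih]
      simp [hm, pvBlocks]
    · rw [List.foldl_cons, pvStepA_nonmarker l (by simpa using hm), ih]
      simp [hm]

-- preamble: in the (none, []) state A skips lines until the first marker
theorem pvPreamble (lines : List String) :
    ∀ (q : PySem.Dict String String),
      lines.foldl pvAStep (q, none, []) =
        match lines.dropWhile (fun x => !pvIsMarker x) with
        | [] => (q, none, [])
        | l :: t =>
            t.foldl pvAStep
              (q, some (PySem.Str.strip (PySem.Str.replace (PySem.Str.strip l) "-- name:" "")), []) := by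
  induction lines with
  | nil => intro q; simp
  | cons l t ih =>
    intro q
    by_cases hm : pvIsMarker l = true
    · rw [List.foldl_cons, pvStepA_none_marker l hm]
      simp [hm]
    · rw [List.foldl_cons, pvStepA_none_nonmarker l (by simpa using hm), ih]
      simp [hm]

theorem pvEq (s : String) : parse_named_queries s = parse_named_queries_alt s := by
  unfold parse_named_queries parse_named_queries_alt
  show (pvADone ((PySem.Str.splitlines s).foldl pvAStep
          (PySem.Dict.empty, (none : Option String), ([] : List String)))).items =
       ((pvBlocks ((PySem.Str.splitlines s).dropWhile (fun x => !pvIsMarker x))).foldl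
          (fun q p => pvFlush q p.1 p.2) PySem.Dict.empty).items
  rw [pvPreamble]
  cases hdw : (PySem.Str.splitlines s).dropWhile (fun x => !pvIsMarker x) with
  | nil => simp [pvADone, pvBlocks]
  | cons l t =>
    rw [pvMain]
    rw [pvBlocks]
    simp [pvFlush]

-- ===== VERDICT (by name: the statement is the Claim_ definition above) =====
theorem parse_named_queries_spec : Claim_equal_parse_named_queries := by
  intro s _
  unfold Spec_parse_named_queries
  exact pvEq s
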